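-- pv_equiv track=rewrite | github.com/felipeaguirre66/udesaInformaticaClase2 | semana_02.py | propagar
-- ===== SOURCE A (Python) =====
-- def propagar(fos):
--     index_1 = [i for i, x in enumerate(fos) if x == 1]
--     index_neg_1 = [i for i, x in enumerate(fos) if x == -1]
--     results = []
--     if len(index_neg_1)>0:
--         for i, f in enumerate(fos):
--             if f != 0:
--                 results.append(f)
--             else:
--                 min_1 = min([abs(i-i1) for i1 in index_1])
--                 min_neg_1 = min([abs(i-i_neg_1) for i_neg_1 in index_neg_1])
--                 if min_1 <= min_neg_1:
--                     results.append(1)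
--                     fos[i] = 1
--                     index_1 = [i for i, x in enumerate(fos) if x == 1]
--                 else:
--                     results.append(0)
--     else:
--         results = [1]*len(fos)
--     return results
-- ===== SOURCE B (Python) =====
-- # B: O(n) re-implementation. A mutates its argument in place (zeros turned to 1);
-- # B does not mutate -- the equivalence claimed is about the return value only.
-- def propagar(fos):
--     if -1 not in fos:
--         return [1] * len(fos)
--     # distance to nearest -1 on the left (None if none yet)
--     left = []
--     d = None
--     for f in fos:
--         d = 0 if f == -1 else (None if d is None else d + 1)
--         left.append(d)
--     # distance to nearest -1 on the right
--     right = []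
--     d = None
--     for f in reversed(fos):
--         d = 0 if f == -1 else (None if d is None else d + 1)
--         right.append(d)
--     right.reverse()
--     near_neg = [l if r is None else (r if l is None or r < l else l)
--                 for l, r in zip(left, right)]
--     # distance to the nearest ORIGINAL 1 at index >= i
--     right_one = []
--     d = None
--     for f in reversed(fos):
--         d = 0 if f == 1 else (None if d is None else d + 1)
--         right_one.append(d)
--     right_one.reverse()
--     out = []
--     last = None  # index of the last 1 written (original or propagated)
--     for i, (f, r1, dn) in enumerate(zip(fos, right_one, near_neg)):
--         if f != 0:
--             out.append(f)
--             if f == 1: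
--                 last = i
--         else:
--             m1 = i - last if last is not None else None
--             if r1 is not None and (m1 is None or r1 < m1):
--                 m1 = r1
--             if m1 is not None and m1 <= dn:
--                 out.append(1)
--                 last = i
--             else:
--                 out.append(0)
--     return out
-- ===== Notes on version B (the rewrite author's own statement) =====
-- stated objective: faster
-- what changed: Instead of recomputing the full index list of 1s and taking a min over all indices at every zero (quadratic), B precomputes nearest--1 distances and the nearest original 1 to the right by linear passes and tracks the last written 1 incrementally, one O(n) sweep.
-- crash fix: When fos contains -1 and 0 but no 1, A raises ValueError (min of an empty sequence); B returns the list unchanged (zeros stay 0, no 1 to propagate). — e.g. on propagar([-1, 0]): A raises ValueError, B returns [-1, 0]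
import Mathlib
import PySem

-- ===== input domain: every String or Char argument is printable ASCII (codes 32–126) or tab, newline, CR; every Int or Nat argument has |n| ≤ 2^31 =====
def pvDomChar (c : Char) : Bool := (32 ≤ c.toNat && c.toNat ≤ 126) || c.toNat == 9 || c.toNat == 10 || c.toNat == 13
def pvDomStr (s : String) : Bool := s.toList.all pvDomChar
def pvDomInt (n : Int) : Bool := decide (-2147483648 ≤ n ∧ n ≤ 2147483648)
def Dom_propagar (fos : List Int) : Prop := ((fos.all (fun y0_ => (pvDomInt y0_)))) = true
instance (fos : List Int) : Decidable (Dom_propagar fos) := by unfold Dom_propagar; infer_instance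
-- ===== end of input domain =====

-- B replaces A's per-zero rescan of all 1/-1 index lists by linear distance passes plus an
-- incrementally tracked last written 1; A mutates its argument in place (zeros set to 1), B does
-- not: the equivalence proved is about the return value.


-- ===== PORT A =====
-- [i for i, x in enumerate(fos) if x == v]: A writes this comprehension for v = 1, for v = -1,
-- and again after each mutation; one shared definition
def pvIdxOf (v : Int) (m : List Int) : List Int :=
  ((PySem.List.enumerate m).filter (fun p => p.2 == v)).map (fun p => p.1)


-- the body of A's for-loop, state (fos, index_1, results); each element is read by enumerate
-- before the only mutation at its own index, so the pairs iterated are those of the original list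
def pvStepA (idxNeg : List Int) (st : List Int × List Int × List Int) (p : Int × Int) :
    List Int × List Int × List Int :=
  let m := st.1; let idx1 := st.2.1; let res := st.2.2
  let i := p.1; let f := p.2
  if f ≠ 0 then (m, idx1, res ++ [f])
  else
    match PySem.List.min? (idx1.map (fun i1 => |i - i1|)) (fun x => x),
          PySem.List.min? (idxNeg.map (fun j => |i - j|)) (fun x => x) with
    | some min1, some minNeg =>
        if min1 ≤ minNeg then
          let m' := PySem.List.pySetD m i 1
          (m', pvIdxOf 1 m', res ++ [1])
        else (m, idx1, res ++ [0])
    | _, _ => (m, idx1, res ++ [0])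


def propagar (fos : List Int) : List Int :=
  let idxNeg := pvIdxOf (-1) fos
  if 0 < idxNeg.length then
    ((PySem.List.enumerate fos).foldl (pvStepA idxNeg) (fos, pvIdxOf 1 fos, [])).2.2
  else List.replicate fos.length 1

-- ===== PORT B =====
-- one forward pass of Source B: running distance d to the nearest previous element equal to v
def pvPass (v : Int) (d : Option Int) : List Int → List (Option Int)
  | [] => []
  | f :: rest =>
      let d' := if f = v then some 0 else d.map (· + 1)
      d' :: pvPass v d' rest


-- "l if r is None else (r if l is None or r < l else l)"; Source B's final-loop lines
-- "m1 = i - last if last is not None else None; if r1 is not None and (m1 is None or r1 < m1):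
-- m1 = r1" compute the same merge, so the port uses it in both places
def pvMergeNN (l r : Option Int) : Option Int :=
  match r with
  | none => l
  | some rv => match l with
               | none => some rv
               | some lv => if rv < lv then some rv else some lv


-- the body of Source B's final loop, state (last, out); dn = none is unreachable (-1 ∈ fos)
def pvStepB (st : Option Int × List Int) (p : Int × (Int × (Option Int × Option Int))) :
    Option Int × List Int :=
  let i := p.1; let f := p.2.1; let r1 := p.2.2.1; let dn := p.2.2.2
  if f ≠ 0 then (if f = 1 then some i else st.1, st.2 ++ [f])
  else
    let m1 : Option Int := pvMergeNN (st.1.map (fun l => i - l)) r1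
    match m1, dn with
    | some mv, some dv => if mv ≤ dv then (some i, st.2 ++ [1]) else (st.1, st.2 ++ [0])
    | _, _ => (st.1, st.2 ++ [0])


def propagar_alt (fos : List Int) : List Int :=
  if (-1 : Int) ∈ fos then
    let left := pvPass (-1) none fos
    let right := (pvPass (-1) none fos.reverse).reverse
    let nearNeg := (left.zip right).map (fun p => pvMergeNN p.1 p.2)
    let rightOne := (pvPass 1 none fos.reverse).reverse
    ((PySem.List.enumerate (fos.zip (rightOne.zip nearNeg))).foldl pvStepB (none, [])).2
  else List.replicate fos.length 1

-- ===== PRECONDITION & SPEC =====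
-- Pre_ excludes exactly the inputs where Python A raises ValueError (min() of an empty
-- sequence): a -1 and a 0 present but no 1.
def Pre_propagar (fos : List Int) : Prop :=
  ¬ ((-1 : Int) ∈ fos ∧ (0 : Int) ∈ fos ∧ (1 : Int) ∉ fos)
instance (fos : List Int) : Decidable (Pre_propagar fos) := by unfold Pre_propagar; infer_instance

def pvWitness_propagar : List Int := [1, 0, 0, -1, 0]

-- When fos contains -1 and 0 but no 1, A raises ValueError; B returns the list unchanged.
def Raises_propagar (fos : List Int) : Prop :=
  (-1 : Int) ∈ fos ∧ (0 : Int) ∈ fos ∧ (1 : Int) ∉ fos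
instance (fos : List Int) : Decidable (Raises_propagar fos) := by unfold Raises_propagar; infer_instance
def pvRaiseWitness_propagar : List Int := [-1, 0]
def pvRaiseWitnessOut_propagar : List Int := [-1, 0]

def Spec_propagar (fos : List Int) (out : List Int) : Prop := out = propagar_alt fos
instance (fos : List Int) (out : List Int) : Decidable (Spec_propagar fos out) := by unfold Spec_propagar; infer_instance

-- ===== CLAIM (what is proved, stated in full; the proofs are below) =====
def Claim_equal_propagar : Prop := ∀ (fos : List Int), Dom_propagar fos → Pre_propagar fos → Spec_propagar fos (propagar fos)
def Claim_raises_propagar : Prop := (∀ (fos : List Int), Dom_propagar fos → Raises_propagar fos → ¬ Pre_propagar fos) ∧ (Dom_propagar (pvRaiseWitness_propagar) ∧ Raises_propagar (pvRaiseWitness_propagar) ∧ propagar_alt (pvRaiseWitness_propagar) = pvRaiseWitnessOut_propagar)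

-- ===== LEMMAS AND PROOFS =====
lemma mem_pvIdxOf {v : Int} {m : List Int} {j : Int} :
    j ∈ pvIdxOf v m ↔ ∃ k : Nat, j = (k : Int) ∧ m[k]? = some v := by
  unfold pvIdxOf
  simp only [List.mem_map, List.mem_filter, PySem.List.mem_enumerate_iff]
  constructor
  · rintro ⟨p, ⟨⟨k, hk, rfl⟩, hv⟩, rfl⟩
    simp only [beq_iff_eq] at hv
    exact ⟨k, by simp, by simp [hk, hv]⟩
  · rintro ⟨k, rfl, hk⟩
    have hlt : k < m.length := (List.getElem?_eq_some_iff.mp hk).1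
    refine ⟨((k : Int), m[k]), ⟨⟨k, hlt, by simp⟩, ?_⟩, rfl⟩
    simp [(List.getElem?_eq_some_iff.mp hk).2]

lemma pvIdxOf_ne_nil {v : Int} {m : List Int} : pvIdxOf v m ≠ [] ↔ v ∈ m := by
  rw [← List.isEmpty_eq_false_iff, List.isEmpty_eq_false_iff_exists_mem]
  constructor
  · rintro ⟨j, hj⟩
    obtain ⟨k, rfl, hk⟩ := mem_pvIdxOf.mp hj
    exact List.mem_of_getElem? hk
  · intro hv
    obtain ⟨k, hk, he⟩ := List.getElem_of_mem hv
    exact ⟨k, mem_pvIdxOf.mpr ⟨k, rfl, by simp [hk, he]⟩⟩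

lemma min?_id_eq_some {l : List Int} {m : Int} (hm : m ∈ l) (hmin : ∀ y ∈ l, m ≤ y) :
    PySem.List.min? l (fun x => x) = some m := by
  cases h : PySem.List.min? l (fun x => x) with
  | none =>
    rw [PySem.List.min?_eq_none_iff] at h
    subst h; simp at hm
  | some m' =>
    have h2 : m' ≤ m := PySem.List.min?_isMin h m hm
    exact congrArg some (le_antisymm h2 (hmin m' (PySem.List.min?_mem h)))

lemma pvPass_length (v : Int) (d : Option Int) (ys : List Int) :
    (pvPass v d ys).length = ys.length := by
  induction ys generalizing d with
  | nil => rfl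
  | cons f rest ih => simp [pvPass, ih]

lemma pvPass_E_zero (v : Int) (d : Option Int) (f : Int) (rest : List Int) :
    (pvPass v d (f :: rest))[0]?.getD none = if f = v then some 0 else d.map (· + 1) := by
  simp [pvPass]

lemma pvPass_E_succ (v : Int) :
    ∀ (ys : List Int) (d : Option Int) (k : Nat), k + 1 < ys.length →
    (pvPass v d ys)[k + 1]?.getD none
      = if ys[k + 1]? = some v then some 0
        else ((pvPass v d ys)[k]?.getD none).map (· + 1) := by
  intro ys
  induction ys with
  | nil => intro d k h; simp at h
  | cons f rest ih =>
    intro d k h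
    match k with
    | 0 =>
      have h0 : 0 < rest.length := by simpa using h
      match rest, h0 with
      | g :: rest', _ =>
        simp only [pvPass]
        simp
    | k + 1 =>
      have h' : k + 1 < rest.length := by simpa using h
      simp only [pvPass, List.getElem?_cons_succ]
      exact ih _ k h'

lemma pvPass_char (v : Int) (ys : List Int) :
    ∀ k, k < ys.length →
    ((pvPass v none ys)[k]?.getD none = none ∧ ∀ j : Nat, j ≤ k → ys[j]? ≠ some v)
    ∨ ∃ j : Nat, j ≤ k ∧ ys[j]? = some v ∧
        (pvPass v none ys)[k]?.getD none = some ((k : Int) - j) ∧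
        ∀ j' : Nat, j < j' → j' ≤ k → ys[j']? ≠ some v := by
  intro k
  induction k with
  | zero =>
    intro h
    match ys, h with
    | f :: rest, _ =>
      by_cases hf : f = v
      · right
        exact ⟨0, le_refl 0, by simp [hf], by simp [pvPass_E_zero, hf], by omega⟩
      · left
        refine ⟨by simp [pvPass_E_zero, hf], ?_⟩
        intro j hj
        interval_cases j
        simp [hf]
  | succ k ih =>
    intro h
    have hk : k < ys.length := by omega
    have hrec := pvPass_E_succ v ys none k h
    by_cases hv : ys[k + 1]? = some v
    · right
      refine ⟨k + 1, le_refl _, hv, ?_, by omega⟩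
      rw [hrec, if_pos hv]
      simp
    · rcases ih hk with ⟨hnone, hall⟩ | ⟨j, hjk, hjv, hE, hbet⟩
      · left
        refine ⟨by rw [hrec, if_neg hv, hnone]; rfl, ?_⟩
        intro j hj
        rcases Nat.lt_or_ge j (k + 1) with h1 | h1
        · exact hall j (by omega)
        · have : j = k + 1 := by omega
          exact this ▸ hv
      · right
        refine ⟨j, by omega, hjv, ?_, ?_⟩
        · rw [hrec, if_neg hv, hE]
          simp only [Option.map_some]
          congr 1
          push_cast
          ring
        · intro j' h1 h2
          rcases Nat.lt_or_ge j' (k + 1) with h3 | h3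
          · exact hbet j' h1 (by omega)
          · have : j' = k + 1 := by omega
            exact this ▸ hv

def pvRight (v : Int) (xs : List Int) : List (Option Int) := (pvPass v none xs.reverse).reverse

lemma pvRight_length (v : Int) (xs : List Int) : (pvRight v xs).length = xs.length := by
  simp [pvRight, pvPass_length]

lemma pvRight_char (v : Int) (xs : List Int) :
    ∀ k, k < xs.length →
    ((pvRight v xs)[k]?.getD none = none ∧ ∀ j : Nat, k ≤ j → j < xs.length → xs[j]? ≠ some v)
    ∨ ∃ j : Nat, k ≤ j ∧ j < xs.length ∧ xs[j]? = some v ∧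
        (pvRight v xs)[k]?.getD none = some ((j : Int) - k) ∧
        ∀ j' : Nat, k ≤ j' → j' < j → xs[j']? ≠ some v := by
  intro k hk
  set n := xs.length with hn
  have hrevlen : xs.reverse.length = n := by rw [List.length_reverse]
  have hklen : n - 1 - k < xs.reverse.length := by omega
  have hEk : (pvRight v xs)[k]? = (pvPass v none xs.reverse)[n - 1 - k]? := by
    rw [pvRight]
    rw [List.getElem?_reverse (by rw [pvPass_length]; omega)]
    congr 1
    rw [pvPass_length]
    omega
  have hys : ∀ j : Nat, j < n → xs.reverse[j]? = xs[n - 1 - j]? := by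
    intro j hj
    rw [List.getElem?_reverse (by omega)]
  rcases pvPass_char v xs.reverse (n - 1 - k) (by omega) with ⟨hnone, hall⟩ | ⟨j, hjk, hjv, hE, hbet⟩
  · left
    refine ⟨by rw [hEk]; exact hnone, ?_⟩
    intro j h1 h2 hv
    exact hall (n - 1 - j) (by omega) (by rw [hys _ (by omega)]; rw [show n - 1 - (n - 1 - j) = j by omega]; exact hv)
  · right
    have hjlt : j < n := by omega
    refine ⟨n - 1 - j, by omega, by omega, ?_, ?_, ?_⟩
    · rw [← hys _ hjlt]; exact hjv
    · rw [hEk, hE]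
      congr 1
      omega
    · intro j' h1 h2 hv
      exact hbet (n - 1 - j') (by omega) (by omega)
        (by rw [hys _ (by omega), show n - 1 - (n - 1 - j') = j' by omega]; exact hv)

lemma abs_dist_right {k j : Nat} (h : k ≤ j) : |(k : Int) - j| = (j : Int) - k := by
  rw [abs_sub_comm]; exact abs_of_nonneg (by omega)

lemma abs_dist_left {k j : Nat} (h : j ≤ k) : |(k : Int) - j| = (k : Int) - j :=
  abs_of_nonneg (by omega)

lemma pvIdxOf_eq_nil_iff {v : Int} {xs : List Int} : pvIdxOf v xs = [] ↔ v ∉ xs := by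
  rw [← pvIdxOf_ne_nil]; tauto

lemma mem_map_pvIdxOf {v : Int} {xs : List Int} {k j : Nat} (hj : xs[j]? = some v) :
    |(k : Int) - j| ∈ (pvIdxOf v xs).map (fun j => |(k : Int) - j|) :=
  List.mem_map.mpr ⟨(j : Int), mem_pvIdxOf.mpr ⟨j, rfl, hj⟩, rfl⟩

lemma minNeg_eq (xs : List Int) (k : Nat) (hk : k < xs.length) :
    PySem.List.min? ((pvIdxOf (-1) xs).map (fun j => |(k : Int) - j|)) (fun x => x)
      = pvMergeNN ((pvPass (-1) none xs)[k]?.getD none) ((pvRight (-1) xs)[k]?.getD none) := by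
  have hcand : ∀ y ∈ (pvIdxOf (-1) xs).map (fun j => |(k : Int) - j|),
      ∃ j : Nat, j < xs.length ∧ xs[j]? = some (-1) ∧ y = |(k : Int) - j| := by
    intro y hy
    obtain ⟨jj, hjj, rfl⟩ := List.mem_map.mp hy
    obtain ⟨j, rfl, hj⟩ := mem_pvIdxOf.mp hjj
    exact ⟨j, (List.getElem?_eq_some_iff.mp hj).1, hj, rfl⟩
  rcases pvPass_char (-1) xs k hk with ⟨hLn, hLall⟩ | ⟨jL, hjL, hjLv, hLE, hLbet⟩ <;>
    rcases pvRight_char (-1) xs k hk with ⟨hRn, hRall⟩ | ⟨jR, hjR1, hjR2, hjRv, hRE, hRbet⟩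
  · -- both none: no -1 at all
    rw [hLn, hRn]
    have hnil : pvIdxOf (-1) xs = [] := by
      rw [pvIdxOf_eq_nil_iff]
      intro hmem
      obtain ⟨j, hjlt, hjv⟩ := List.getElem_of_mem hmem
      by_cases h1 : j ≤ k
      · exact hLall j h1 (by simp [hjlt, hjv])
      · exact hRall j (by omega) hjlt (by simp [hjlt, hjv])
    rw [hnil]
    simp [pvMergeNN, PySem.List.min?_eq_none_iff]
  · -- only right
    rw [hLn, hRE]
    show PySem.List.min? _ _ = some ((jR : Int) - k)
    refine min?_id_eq_some (abs_dist_right hjR1 ▸ mem_map_pvIdxOf hjRv) ?_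
    intro y hy
    obtain ⟨j, hjlt, hjv, rfl⟩ := hcand y hy
    by_cases h1 : j ≤ k
    · exact absurd hjv (hLall j h1)
    · have hge : jR ≤ j := by
        by_contra hlt
        exact hRbet j (by omega) (by omega) hjv
      rw [abs_dist_right (by omega)]; omega
  · -- only left
    rw [hRn, hLE]
    show PySem.List.min? _ _ = some ((k : Int) - jL)
    refine min?_id_eq_some (abs_dist_left hjL ▸ mem_map_pvIdxOf hjLv) ?_
    intro y hy
    obtain ⟨j, hjlt, hjv, rfl⟩ := hcand y hy
    by_cases h1 : j ≤ k
    · have hle : j ≤ jL := by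
        by_contra hgt
        exact hLbet j (by omega) h1 hjv
      rw [abs_dist_left h1]; omega
    · exact absurd hjv (hRall j (by omega) hjlt)
  · -- both some
    rw [hLE, hRE]
    have hboundL : ∀ j : Nat, j ≤ k → xs[j]? = some (-1) → (k : Int) - jL ≤ |(k : Int) - j| := by
      intro j h1 hjv
      have hle : j ≤ jL := by
        by_contra hgt
        exact hLbet j (by omega) h1 hjv
      rw [abs_dist_left h1]; omega
    have hboundR : ∀ j : Nat, k ≤ j → j < xs.length → xs[j]? = some (-1) → (jR : Int) - k ≤ |(k : Int) - j| := by
      intro j h1 h2 hjv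
      have hge : jR ≤ j := by
        by_contra hlt
        exact hRbet j h1 (by omega) hjv
      rw [abs_dist_right h1]; omega
    show PySem.List.min? _ _ = pvMergeNN (some ((k : Int) - jL)) (some ((jR : Int) - k))
    rw [show pvMergeNN (some ((k : Int) - jL)) (some ((jR : Int) - k))
          = if (jR : Int) - k < (k : Int) - jL then some ((jR : Int) - k) else some ((k : Int) - jL) from rfl]
    split_ifs with hcmp
    · refine min?_id_eq_some (abs_dist_right hjR1 ▸ mem_map_pvIdxOf hjRv) ?_
      intro y hy
      obtain ⟨j, hjlt, hjv, rfl⟩ := hcand y hy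
      by_cases h1 : j ≤ k
      · have := hboundL j h1 hjv; omega
      · have := hboundR j (by omega) hjlt hjv; omega
    · refine min?_id_eq_some (abs_dist_left hjL ▸ mem_map_pvIdxOf hjLv) ?_
      intro y hy
      obtain ⟨j, hjlt, hjv, rfl⟩ := hcand y hy
      by_cases h1 : j ≤ k
      · have := hboundL j h1 hjv; omega
      · have := hboundR j (by omega) hjlt hjv; omega

def LastSpec (last : Option Int) (m : List Int) (k : Nat) : Prop :=
  match last with
  | none => ∀ j : Nat, j < k → m[j]? ≠ some 1
  | some l => ∃ lN : Nat, l = (lN : Int) ∧ lN < k ∧ m[lN]? = some 1 ∧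
      ∀ j : Nat, lN < j → j < k → m[j]? ≠ some 1

lemma minOne_eq (xs m : List Int) (last : Option Int) (k : Nat) (hk : k < xs.length)
    (hsuf : ∀ j : Nat, k ≤ j → m[j]? = xs[j]?)
    (hk0 : xs[k]? = some 0)
    (hl : LastSpec last m k) :
    PySem.List.min? ((pvIdxOf 1 m).map (fun j => |(k : Int) - j|)) (fun x => x)
      = pvMergeNN (last.map (fun l => (k : Int) - l)) ((pvRight 1 xs)[k]?.getD none) := by
  have hmk : m[k]? = some 0 := by rw [hsuf k (le_refl k)]; exact hk0
  have hcand : ∀ y ∈ (pvIdxOf 1 m).map (fun j => |(k : Int) - j|),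
      ∃ j : Nat, m[j]? = some 1 ∧ y = |(k : Int) - j| := by
    intro y hy
    obtain ⟨jj, hjj, rfl⟩ := List.mem_map.mp hy
    obtain ⟨j, rfl, hj⟩ := mem_pvIdxOf.mp hjj
    exact ⟨j, hj, rfl⟩
  cases last with
  | none =>
    simp only [Option.map_none]
    rcases pvRight_char 1 xs k hk with ⟨hRn, hRall⟩ | ⟨jR, hjR1, hjR2, hjRv, hRE, hRbet⟩
    · rw [hRn]
      have hnil : pvIdxOf 1 m = [] := by
        rw [pvIdxOf_eq_nil_iff]
        intro hmem
        obtain ⟨j, hjlt, hjv⟩ := List.getElem_of_mem hmem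
        have hjq : m[j]? = some 1 := by simp [hjlt, hjv]
        by_cases h1 : j < k
        · exact hl j h1 hjq
        · have hxj : xs[j]? = some 1 := by rw [← hsuf j (by omega)]; exact hjq
          have hjx : j < xs.length := (List.getElem?_eq_some_iff.mp hxj).1
          exact hRall j (by omega) hjx hxj
      rw [hnil]
      simp [pvMergeNN, PySem.List.min?_eq_none_iff]
    · rw [hRE]
      have hmR : m[jR]? = some 1 := by rw [hsuf jR hjR1]; exact hjRv
      show PySem.List.min? _ _ = some ((jR : Int) - k)
      refine min?_id_eq_some (abs_dist_right hjR1 ▸ mem_map_pvIdxOf hmR) ?_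
      intro y hy
      obtain ⟨j, hjv, rfl⟩ := hcand y hy
      by_cases h1 : j < k
      · exact absurd hjv (hl j h1)
      · have hxj : xs[j]? = some 1 := by rw [← hsuf j (by omega)]; exact hjv
        have hge : jR ≤ j := by
          by_contra hlt
          exact hRbet j (by omega) (by omega) hxj
        rw [abs_dist_right (by omega)]; omega
  | some l =>
    obtain ⟨lN, rfl, hlk, hlv, hlbet⟩ := hl
    simp only [Option.map_some]
    have hboundL : ∀ j : Nat, j < k → m[j]? = some 1 → (k : Int) - lN ≤ |(k : Int) - j| := by
      intro j h1 hjv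
      have hle : j ≤ lN := by
        by_contra hgt
        exact hlbet j (by omega) h1 hjv
      rw [abs_dist_left (by omega)]; omega
    rcases pvRight_char 1 xs k hk with ⟨hRn, hRall⟩ | ⟨jR, hjR1, hjR2, hjRv, hRE, hRbet⟩
    · rw [hRn]
      show PySem.List.min? _ _ = some ((k : Int) - lN)
      refine min?_id_eq_some (abs_dist_left (show lN ≤ k by omega) ▸ mem_map_pvIdxOf hlv) ?_
      intro y hy
      obtain ⟨j, hjv, rfl⟩ := hcand y hy
      by_cases h1 : j < k
      · exact hboundL j h1 hjv
      · have hxj : xs[j]? = some 1 := by rw [← hsuf j (by omega)]; exact hjv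
        have hjx : j < xs.length := (List.getElem?_eq_some_iff.mp hxj).1
        exact absurd hxj (hRall j (by omega) hjx)
    · rw [hRE]
      have hmR : m[jR]? = some 1 := by rw [hsuf jR hjR1]; exact hjRv
      have hboundR : ∀ j : Nat, k ≤ j → m[j]? = some 1 → (jR : Int) - k ≤ |(k : Int) - j| := by
        intro j h1 hjv
        have hxj : xs[j]? = some 1 := by rw [← hsuf j h1]; exact hjv
        have hge : jR ≤ j := by
          by_contra hlt
          exact hRbet j h1 (by omega) hxj
        rw [abs_dist_right h1]; omega
      rw [show pvMergeNN (some ((k : Int) - lN)) (some ((jR : Int) - k))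
            = if (jR : Int) - k < (k : Int) - lN then some ((jR : Int) - k) else some ((k : Int) - lN) from rfl]
      split_ifs with hcmp
      · refine min?_id_eq_some (abs_dist_right hjR1 ▸ mem_map_pvIdxOf hmR) ?_
        intro y hy
        obtain ⟨j, hjv, rfl⟩ := hcand y hy
        by_cases h1 : j < k
        · have := hboundL j h1 hjv; omega
        · have := hboundR j (by omega) hjv; omega
      · refine min?_id_eq_some (abs_dist_left (show lN ≤ k by omega) ▸ mem_map_pvIdxOf hlv) ?_
        intro y hy
        obtain ⟨j, hjv, rfl⟩ := hcand y hy
        by_cases h1 : j < k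
        · have := hboundL j h1 hjv; omega
        · have := hboundR j (by omega) hjv; omega


def pvNNL (xs : List Int) : List (Option Int) :=
  ((pvPass (-1) none xs).zip (pvRight (-1) xs)).map (fun p => pvMergeNN p.1 p.2)

lemma pvNNL_length (xs : List Int) : (pvNNL xs).length = xs.length := by
  simp [pvNNL, pvPass_length, pvRight_length]

lemma drop_eq_getD_cons {α : Type} (l : List α) (n : Nat) (d : α) (h : n < l.length) :
    l.drop n = (l[n]?.getD d) :: l.drop (n + 1) := by
  rw [List.drop_eq_getElem_cons h, List.getElem?_eq_getElem h]
  rfl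

lemma pvNNL_entry (xs : List Int) (k : Nat) (hk : k < xs.length) :
    (pvNNL xs)[k]?.getD none
      = pvMergeNN ((pvPass (-1) none xs)[k]?.getD none) ((pvRight (-1) xs)[k]?.getD none) := by
  have h1 : k < (pvPass (-1) none xs).length := by rw [pvPass_length]; omega
  have h2 : k < (pvRight (-1) xs).length := by rw [pvRight_length]; omega
  have h3 : k < (pvNNL xs).length := by rw [pvNNL_length]; omega
  rw [List.getElem?_eq_getElem h1, List.getElem?_eq_getElem h2, List.getElem?_eq_getElem h3]
  simp [pvNNL, List.getElem_zip]

lemma mainAB (xs : List Int) (hneg : (-1 : Int) ∈ xs) :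
    ∀ (suf pre m : List Int) (last : Option Int) (res : List Int),
    xs = pre ++ suf →
    (∀ j : Nat, pre.length ≤ j → m[j]? = xs[j]?) →
    LastSpec last m pre.length →
    ((PySem.List.enumerate suf (pre.length : Int)).foldl (pvStepA (pvIdxOf (-1) xs))
        (m, pvIdxOf 1 m, res)).2.2
      = ((PySem.List.enumerate
            (suf.zip (((pvRight 1 xs).drop pre.length).zip ((pvNNL xs).drop pre.length)))
            (pre.length : Int)).foldl pvStepB (last, res)).2 := by
  intro suf
  induction suf with
  | nil =>
    intro pre m last res hx hsuf hl
    simp [PySem.List.enumerate_nil]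
  | cons f rest ih =>
    intro pre m last res hx hsuf hl
    set kk := pre.length with hkk
    have hk : kk < xs.length := by rw [hx]; simp [hkk]
    have hxf : xs[kk]? = some f := by
      rw [hx]
      rw [List.getElem?_append_right (by omega)]
      simp [hkk]
    have hdropR : (pvRight 1 xs).drop kk
        = ((pvRight 1 xs)[kk]?.getD none) :: (pvRight 1 xs).drop (kk + 1) :=
      drop_eq_getD_cons _ _ _ (by rw [pvRight_length]; omega)
    have hdropN : (pvNNL xs).drop kk
        = ((pvNNL xs)[kk]?.getD none) :: (pvNNL xs).drop (kk + 1) :=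
      drop_eq_getD_cons _ _ _ (by rw [pvNNL_length]; omega)
    set rv := (pvRight 1 xs)[kk]?.getD none with hrv
    set nnv := (pvNNL xs)[kk]?.getD none with hnnv
    have hx' : xs = (pre ++ [f]) ++ rest := by rw [hx]; simp
    have hlen' : (pre ++ [f]).length = kk + 1 := by simp [hkk]
    have hcast : (kk : Int) + 1 = ((kk + 1 : Nat) : Int) := by push_cast; ring
    rw [hdropR, hdropN]
    simp only [List.zip_cons_cons, PySem.List.enumerate_cons, List.foldl_cons]
    by_cases hf : f = 0
    · -- the zero case
      subst hf
      -- the -1 minimum is defined (−1 ∈ xs)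
      obtain ⟨dv, hdv⟩ : ∃ dv, PySem.List.min? ((pvIdxOf (-1) xs).map (fun j => |(kk : Int) - j|))
          (fun x => x) = some dv := by
        cases h : PySem.List.min? ((pvIdxOf (-1) xs).map (fun j => |(kk : Int) - j|)) (fun x => x) with
        | some dv => exact ⟨dv, rfl⟩
        | none =>
          rw [PySem.List.min?_eq_none_iff, List.map_eq_nil_iff, pvIdxOf_eq_nil_iff] at h
          exact absurd hneg h
      have hnn_dv : nnv = some dv := by
        rw [hnnv, pvNNL_entry xs kk hk, ← minNeg_eq xs kk hk, hdv]
      have hone := minOne_eq xs m last kk hk hsuf hxf hl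
      rw [← hrv] at hone
      -- both sides branch on the same merged minimum
      cases hm1 : pvMergeNN (last.map (fun l => (kk : Int) - l)) rv with
      | none =>
        have hA : pvStepA (pvIdxOf (-1) xs) (m, pvIdxOf 1 m, res) ((kk : Int), 0)
            = (m, pvIdxOf 1 m, res ++ [0]) := by
          simp only [pvStepA]
          rw [hone, hm1, hdv]
          simp
        have hB : pvStepB (last, res) ((kk : Int), (0, (rv, nnv)))
            = (last, res ++ [0]) := by
          simp only [pvStepB]
          rw [hm1, hnn_dv]
          simp
        rw [hA, hB, hcast, ← hlen']
        refine ih (pre ++ [0]) m last (res ++ [0]) hx' ?_ ?_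
        · intro j hj; exact hsuf j (by simp at hj ⊢; omega)
        · -- last unchanged; m[kk] = 0 ≠ 1
          have hmk : m[kk]? = some 0 := by rw [hsuf kk (le_refl kk)]; exact hxf
          rw [hlen']
          cases last with
          | none =>
            intro j hj
            rcases Nat.lt_or_ge j kk with h1 | h1
            · exact hl j h1
            · have : j = kk := by omega
              subst this; rw [hmk]; simp
          | some l =>
            obtain ⟨lN, rfl, h1, h2, h3⟩ := hl
            refine ⟨lN, rfl, by omega, h2, ?_⟩
            intro j hj1 hj2
            rcases Nat.lt_or_ge j kk with h4 | h4
            · exact h3 j hj1 h4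
            · have : j = kk := by omega
              subst this; rw [hmk]; simp
      | some mv =>
        by_cases hcmp : mv ≤ dv
        · -- propagate: both append 1
          have hA : pvStepA (pvIdxOf (-1) xs) (m, pvIdxOf 1 m, res) ((kk : Int), 0)
              = (m.set kk 1, pvIdxOf 1 (m.set kk 1), res ++ [1]) := by
            simp only [pvStepA]
            rw [hone, hm1, hdv]
            simp [hcmp, PySem.List.pySetD_natCast]
          have hB : pvStepB (last, res) ((kk : Int), (0, (rv, nnv)))
              = (some (kk : Int), res ++ [1]) := by
            simp only [pvStepB]
            rw [hm1, hnn_dv]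
            simp [hcmp]
          rw [hA, hB, hcast, ← hlen']
          refine ih (pre ++ [0]) (m.set kk 1) (some (kk : Int)) (res ++ [1]) hx' ?_ ?_
          · intro j hj
            have hjne : j ≠ kk := by simp at hj; omega
            rw [List.getElem?_set_ne (Ne.symm hjne)]
            exact hsuf j (by simp at hj ⊢; omega)
          · rw [hlen']
            have hmlen : kk < m.length := by
              have := hsuf kk (le_refl kk)
              rw [hxf] at this
              exact (List.getElem?_eq_some_iff.mp this).1
            exact ⟨kk, rfl, by omega, by rw [List.getElem?_set_self hmlen], by omega⟩
        · -- both append 0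
          have hA : pvStepA (pvIdxOf (-1) xs) (m, pvIdxOf 1 m, res) ((kk : Int), 0)
              = (m, pvIdxOf 1 m, res ++ [0]) := by
            simp only [pvStepA]
            rw [hone, hm1, hdv]
            simp [hcmp]
          have hB : pvStepB (last, res) ((kk : Int), (0, (rv, nnv)))
              = (last, res ++ [0]) := by
            simp only [pvStepB]
            rw [hm1, hnn_dv]
            simp [hcmp]
          rw [hA, hB, hcast, ← hlen']
          refine ih (pre ++ [0]) m last (res ++ [0]) hx' ?_ ?_
          · intro j hj; exact hsuf j (by simp at hj ⊢; omega)
          · have hmk : m[kk]? = some 0 := by rw [hsuf kk (le_refl kk)]; exact hxf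
            rw [hlen']
            cases last with
            | none =>
              intro j hj
              rcases Nat.lt_or_ge j kk with h1 | h1
              · exact hl j h1
              · have : j = kk := by omega
                subst this; rw [hmk]; simp
            | some l =>
              obtain ⟨lN, rfl, h1, h2, h3⟩ := hl
              refine ⟨lN, rfl, by omega, h2, ?_⟩
              intro j hj1 hj2
              rcases Nat.lt_or_ge j kk with h4 | h4
              · exact h3 j hj1 h4
              · have : j = kk := by omega
                subst this; rw [hmk]; simp
    · -- the nonzero case: both copy f
      have hA : pvStepA (pvIdxOf (-1) xs) (m, pvIdxOf 1 m, res) ((kk : Int), f)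
          = (m, pvIdxOf 1 m, res ++ [f]) := by
        simp only [pvStepA]
        simp [hf]
      have hB : pvStepB (last, res) ((kk : Int), (f, (rv, nnv)))
          = (if f = 1 then some (kk : Int) else last, res ++ [f]) := by
        simp only [pvStepB]
        simp [hf]
      rw [hA, hB, hcast, ← hlen']
      have hmk : m[kk]? = some f := by rw [hsuf kk (le_refl kk)]; exact hxf
      refine ih (pre ++ [f]) m (if f = 1 then some (kk : Int) else last) (res ++ [f]) hx' ?_ ?_
      · intro j hj; exact hsuf j (by simp at hj ⊢; omega)
      · rw [hlen']
        by_cases h1 : f = 1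
        · subst h1
          rw [if_pos rfl]
          exact ⟨kk, rfl, by omega, hmk, by omega⟩
        · rw [if_neg h1]
          have hne1 : m[kk]? ≠ some 1 := by rw [hmk]; simp; omega
          cases last with
          | none =>
            intro j hj
            rcases Nat.lt_or_ge j kk with h2 | h2
            · exact hl j h2
            · have : j = kk := by omega
              subst this; exact hne1
          | some l =>
            obtain ⟨lN, rfl, h2, h3, h4⟩ := hl
            refine ⟨lN, rfl, by omega, h3, ?_⟩
            intro j hj1 hj2
            rcases Nat.lt_or_ge j kk with h5 | h5
            · exact h4 j hj1 h5
            · have : j = kk := by omega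
              subst this; exact hne1


lemma propagar_eq_alt (fos : List Int) : propagar fos = propagar_alt fos := by
  by_cases hneg : (-1 : Int) ∈ fos
  · have hguard : 0 < (pvIdxOf (-1) fos).length :=
      List.length_pos_of_ne_nil (pvIdxOf_ne_nil.mpr hneg)
    show (if 0 < (pvIdxOf (-1) fos).length then _ else _) = _
    rw [propagar_alt, if_pos hneg]
    simp only [if_pos hguard]
    have h := mainAB fos hneg fos [] fos none []
      (by simp) (fun j _ => rfl) (by intro j hj; simp at hj)
    simp only [List.length_nil, Nat.cast_zero, List.drop_zero] at h
    exact h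
  · have hguard : ¬ 0 < (pvIdxOf (-1) fos).length := by
      rw [pvIdxOf_eq_nil_iff.mpr hneg]
      simp
    rw [propagar, propagar_alt, if_neg hneg]
    simp only [if_neg hguard]

-- ===== VERDICT (by name: the statement is the Claim_ definition above) =====
theorem propagar_spec : Claim_equal_propagar := by
  intro fos _ _
  unfold Spec_propagar
  exact propagar_eq_alt fos
def propagar_raises : Claim_raises_propagar := by
  unfold Claim_raises_propagar
  exact ⟨fun fos _ h hp => hp h, by decide⟩
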